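-- pv_equiv track=rewrite | github.com/PatoLocos/Erdos530 | experiments/verify_axiom_counting.py | compute_witness_pairs_ordered
-- ===== SOURCE A (Python) =====
-- from collections import defaultdict
--
-- def compute_witness_pairs_ordered(S, A):
--     """Compute witness pairs using ORDERED pairs (a,b) ∈ S×S."""
--     S_set = set(S)
--     S_list = sorted(S)
--     sum_table = defaultdict(list)
--     for a in S_list:
--         for b in S_list:
--             sum_table[a + b].append((a, b))
--     blocked = {}
--     for x in sorted(A - S_set):
--         pairs = set()
--         for c in S_list:
--             target = x + c
--             if target in sum_table:
--                 for (a, b) in sum_table[target]: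
--                     if (x == a and c == b) or (x == b and c == a):
--                         continue
--                     pairs.add((a, b))
--         target2 = 2 * x
--         if target2 in sum_table:
--             for (a, b) in sum_table[target2]:
--                 if a != b:
--                     pairs.add((a, b))
--         if pairs:
--             blocked[x] = pairs
--     return blocked
-- ===== SOURCE B (Python) =====
-- def compute_witness_pairs_ordered(S, A):
--     """Compute witness pairs using ORDERED pairs (a,b) in S x S.
--
--     No sum_table index: for each external x and each (c, a) the unique
--     partner b = x + c - a is computed directly and membership-tested."""
--     S_set = set(S)
--     S_list = sorted(S)
--     blocked = {}
--     for x in sorted(A - S_set):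
--         pairs = set()
--         for c in S_list:
--             for a in S_list:
--                 b = x + c - a
--                 if b in S_set:
--                     if (x == a and c == b) or (x == b and c == a):
--                         continue
--                     pairs.add((a, b))
--         for a in S_list:
--             b = 2 * x - a
--             if b in S_set and a != b:
--                 pairs.add((a, b))
--         if pairs:
--             blocked[x] = pairs
--     return blocked
-- ===== Notes on version B (the rewrite author's own statement) =====
-- stated objective: alternative
-- what changed: B removes A's precomputed sum_table defaultdict entirely: instead of indexing all ordered pair sums and gathering table entries per target, B computes for each (c, a) the unique partner b = x + c - a (and b = 2*x - a for the doubling case) and membership-tests it against set(S).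
import Mathlib
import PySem

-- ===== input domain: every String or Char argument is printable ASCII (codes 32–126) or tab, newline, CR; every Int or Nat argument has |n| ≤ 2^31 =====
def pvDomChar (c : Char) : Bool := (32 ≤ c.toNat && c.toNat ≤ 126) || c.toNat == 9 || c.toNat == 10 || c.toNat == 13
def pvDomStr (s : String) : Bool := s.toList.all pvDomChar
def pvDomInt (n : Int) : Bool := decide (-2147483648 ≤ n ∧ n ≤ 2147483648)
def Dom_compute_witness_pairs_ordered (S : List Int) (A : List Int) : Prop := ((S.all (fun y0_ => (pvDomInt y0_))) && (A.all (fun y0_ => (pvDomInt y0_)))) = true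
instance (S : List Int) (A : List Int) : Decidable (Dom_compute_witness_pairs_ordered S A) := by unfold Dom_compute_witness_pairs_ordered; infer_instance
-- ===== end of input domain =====

-- B drops A's precomputed sum_table index: for each external x it computes the unique partner
-- b = x + c - a directly and membership-tests it (objective: alternative decomposition, equal value).
-- Python set values are represented as PySem.Set lists in first-insertion order; the returned dict
-- as its association list in (sorted-key) insertion order.

-- ===== PORT A =====
def compute_witness_pairs_ordered (S : List Int) (A : List Int) : List (Int × List (Int × Int)) :=
  let S_set : PySem.Set Int := PySem.Set.ofList S
  let S_list := PySem.List.sorted S (fun v => v) false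
  let sum_table : PySem.Dict Int (List (Int × Int)) :=
    S_list.foldl (fun t a =>
      S_list.foldl (fun t b => t.modify (a + b) [] (· ++ [(a, b)])) t) PySem.Dict.empty
  let blocked : PySem.Dict Int (List (Int × Int)) :=
    (PySem.List.sorted (PySem.Set.diff (PySem.Set.ofList A) S_set) (fun v => v) false).foldl
      (fun blocked x =>
        let pairs : PySem.Set (Int × Int) :=
          S_list.foldl (fun pairs c =>
            let target := x + c
            if sum_table.contains target then
              (sum_table.getD target []).foldl (fun pairs ab =>
                if (x = ab.1 ∧ c = ab.2) ∨ (x = ab.2 ∧ c = ab.1) then pairs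
                else PySem.Set.add pairs ab) pairs
            else pairs) PySem.Set.empty
        let target2 := 2 * x
        let pairs :=
          if sum_table.contains target2 then
            (sum_table.getD target2 []).foldl (fun pairs ab =>
              if ab.1 ≠ ab.2 then PySem.Set.add pairs ab else pairs) pairs
          else pairs
        if pairs ≠ [] then blocked.insert x pairs else blocked) PySem.Dict.empty
  blocked.items

-- ===== PORT B =====
def compute_witness_pairs_ordered_alt (S : List Int) (A : List Int) : List (Int × List (Int × Int)) :=
  let S_set : PySem.Set Int := PySem.Set.ofList S
  let S_list := PySem.List.sorted S (fun v => v) false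
  let blocked : PySem.Dict Int (List (Int × Int)) :=
    (PySem.List.sorted (PySem.Set.diff (PySem.Set.ofList A) S_set) (fun v => v) false).foldl
      (fun blocked x =>
        let pairs : PySem.Set (Int × Int) :=
          S_list.foldl (fun pairs c =>
            S_list.foldl (fun pairs a =>
              let b := x + c - a
              if S_set.contains b = true then
                if (x = a ∧ c = b) ∨ (x = b ∧ c = a) then pairs
                else PySem.Set.add pairs (a, b)
              else pairs) pairs) PySem.Set.empty
        let pairs :=
          S_list.foldl (fun pairs a =>
            let b := 2 * x - a
            if S_set.contains b = true ∧ a ≠ b then PySem.Set.add pairs (a, b) else pairs) pairs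
        if pairs ≠ [] then blocked.insert x pairs else blocked) PySem.Dict.empty
  blocked.items

-- ===== PRECONDITION & SPEC =====
def Spec_compute_witness_pairs_ordered (S : List Int) (A : List Int) (out : List (Int × List (Int × Int))) : Prop := out = compute_witness_pairs_ordered_alt S A
instance (S : List Int) (A : List Int) (out : List (Int × List (Int × Int))) : Decidable (Spec_compute_witness_pairs_ordered S A out) := by unfold Spec_compute_witness_pairs_ordered; infer_instance

-- ===== CLAIM (what is proved, stated in full; the proofs are below) =====
def Claim_equal_compute_witness_pairs_ordered : Prop := ∀ (S : List Int) (A : List Int), Dom_compute_witness_pairs_ordered S A → Spec_compute_witness_pairs_ordered S A (compute_witness_pairs_ordered S A)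

-- ===== LEMMAS AND PROOFS =====

-- sum_table characterised: looking up t yields, for each a in L (in order), the pair (a, t-a)
-- with the multiplicity of t-a in L
theorem pv_table_getD (L : List Int) (t : Int) :
    (L.foldl (fun d a =>
      L.foldl (fun d b => d.modify (a + b) [] (· ++ [(a, b)])) d)
        (PySem.Dict.empty : PySem.Dict Int (List (Int × Int)))).getD t []
    = L.flatMap (fun a => List.replicate (L.count (t - a)) (a, t - a)) := by
  have h1 : ∀ (d : PySem.Dict Int (List (Int × Int))),
      L.foldl (fun d a => L.foldl (fun d b => d.modify (a + b) [] (· ++ [(a, b)])) d) d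
      = (L.flatMap (fun a => L.map (fun b => ((a + b : Int), (a, b))))).foldl
          (fun d p => d.modify p.1 [] (· ++ [p.2])) d := by
    intro d
    rw [List.foldl_flatMap]
    congr 1
    funext d a
    rw [List.foldl_map]
  rw [h1, PySem.Dict.getD_foldl_modify_append]
  simp only [PySem.Dict.getD_empty, List.nil_append, List.filter_flatMap, List.map_flatMap]
  congr 1
  funext a
  have h2 : ∀ b : Int,
      ((fun (p : Int × (Int × Int)) => p.1 == t) ∘ (fun b => ((a + b : Int), (a, b)))) b
      = (b == t - a) := by
    intro b
    simp only [Function.comp]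
    by_cases h : a + b = t
    · simp [h]; omega
    · simp [h]; omega
  simp only [List.filter_map, List.map_map]
  rw [List.filter_congr (fun b _ => h2 b), List.filter_beq, List.map_replicate]
  simp

-- "if target in table: iterate table[target]" is just iterating table.getD target []
theorem pv_contains_elim {α : Type} (d : PySem.Dict Int (List (Int × Int)))
    (t : Int) (f : α → Int × Int → α) (p : α) :
    (if d.contains t = true then (d.getD t []).foldl f p else p) = (d.getD t []).foldl f p := by
  cases h : d.contains t
  · rw [PySem.Dict.getD_of_not_contains _ _ h]
    simp
  · simp

-- a fold over replicate k q with an idempotent step is one step (k ≥ 1)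
theorem pv_foldl_idem_replicate {α β : Type} (f : α → β → α) (q : β)
    (h : ∀ s, f (f s q) q = f s q) : ∀ (k : Nat) (s : α), 0 < k →
    (List.replicate k q).foldl f s = f s q := by
  intro k
  induction k with
  | zero => intro s hk; omega
  | succ n ih =>
    intro s _
    cases n with
    | zero => simp
    | succ m =>
      have hrep : List.replicate (m + 1 + 1) q = q :: List.replicate (m + 1) q := rfl
      rw [hrep, List.foldl_cons, ih (f s q) (by omega)]
      exact h s

-- the main gather loop of A equals B's partner-computation loop
theorem pv_main_eq (L : List Int) (sset : PySem.Set Int)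
    (hmem : ∀ v : Int, sset.contains v = true ↔ v ∈ L) (x : Int) (p : PySem.Set (Int × Int)) :
    L.foldl (fun pairs c =>
      if (L.foldl (fun t a => L.foldl (fun t b => t.modify (a + b) [] (· ++ [(a, b)])) t)
            (PySem.Dict.empty : PySem.Dict Int (List (Int × Int)))).contains (x + c) then
        ((L.foldl (fun t a => L.foldl (fun t b => t.modify (a + b) [] (· ++ [(a, b)])) t)
            (PySem.Dict.empty : PySem.Dict Int (List (Int × Int)))).getD (x + c) []).foldl
          (fun pairs ab =>
            if (x = ab.1 ∧ c = ab.2) ∨ (x = ab.2 ∧ c = ab.1) then pairs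
            else PySem.Set.add pairs ab) pairs
      else pairs) p
    = L.foldl (fun pairs c =>
        L.foldl (fun pairs a =>
          if sset.contains (x + c - a) = true then
            if (x = a ∧ c = x + c - a) ∨ (x = x + c - a ∧ c = a) then pairs
            else PySem.Set.add pairs (a, x + c - a)
          else pairs) pairs) p := by
  congr 1
  funext pairs c
  rw [pv_contains_elim, pv_table_getD, List.foldl_flatMap]
  congr 1
  funext s a
  rcases Nat.eq_zero_or_pos (L.count (x + c - a)) with h0 | hpos
  · rw [h0]
    have hnm : ¬ (x + c - a) ∈ L := List.count_eq_zero.mp h0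
    rw [if_neg (fun hc => hnm ((hmem _).mp hc))]
    simp
  · rw [pv_foldl_idem_replicate _ (a, x + c - a) ?_ _ s hpos]
    · rw [if_pos ((hmem _).mpr (List.count_pos_iff.mp hpos))]
    · intro s'
      by_cases hid : (x = (a, x + c - a).1 ∧ c = (a, x + c - a).2) ∨
          (x = (a, x + c - a).2 ∧ c = (a, x + c - a).1)
      · simp only [if_pos hid]
      · simp only [if_neg hid]
        exact PySem.Set.add_of_mem ((PySem.Set.mem_add _ _ _).mpr (Or.inr rfl))

-- the doubling block of A equals B's second loop
theorem pv_dbl_eq (L : List Int) (sset : PySem.Set Int)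
    (hmem : ∀ v : Int, sset.contains v = true ↔ v ∈ L) (x : Int) (p : PySem.Set (Int × Int)) :
    (if (L.foldl (fun t a => L.foldl (fun t b => t.modify (a + b) [] (· ++ [(a, b)])) t)
          (PySem.Dict.empty : PySem.Dict Int (List (Int × Int)))).contains (2 * x) then
      ((L.foldl (fun t a => L.foldl (fun t b => t.modify (a + b) [] (· ++ [(a, b)])) t)
          (PySem.Dict.empty : PySem.Dict Int (List (Int × Int)))).getD (2 * x) []).foldl
        (fun pairs ab => if ab.1 ≠ ab.2 then PySem.Set.add pairs ab else pairs) p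
    else p)
    = L.foldl (fun pairs a =>
        if sset.contains (2 * x - a) = true ∧ a ≠ 2 * x - a then
          PySem.Set.add pairs (a, 2 * x - a)
        else pairs) p := by
  rw [pv_contains_elim, pv_table_getD, List.foldl_flatMap]
  congr 1
  funext s a
  rcases Nat.eq_zero_or_pos (L.count (2 * x - a)) with h0 | hpos
  · rw [h0]
    have hnm : ¬ (2 * x - a) ∈ L := List.count_eq_zero.mp h0
    rw [if_neg (fun hc => hnm ((hmem _).mp hc.1))]
    simp
  · rw [pv_foldl_idem_replicate _ (a, 2 * x - a) ?_ _ s hpos]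
    · have hc : sset.contains (2 * x - a) = true := (hmem _).mpr (List.count_pos_iff.mp hpos)
      split_ifs with h1 h2 h2
      · rfl
      · exact absurd ⟨hc, h1⟩ h2
      · exact absurd h2.2 h1
      · rfl
    · intro s'
      by_cases hq : ((a, 2 * x - a).1 : Int) ≠ (a, 2 * x - a).2
      · simp only [if_pos hq]
        exact PySem.Set.add_of_mem ((PySem.Set.mem_add _ _ _).mpr (Or.inr rfl))
      · simp only [if_neg hq]

-- ===== VERDICT (by name: the statement is the Claim_ definition above) =====
theorem compute_witness_pairs_ordered_spec : Claim_equal_compute_witness_pairs_ordered := by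
  intro S A _
  unfold Spec_compute_witness_pairs_ordered
  simp only [compute_witness_pairs_ordered, compute_witness_pairs_ordered_alt]
  have hmem : ∀ v : Int, (PySem.Set.ofList S).contains v = true ↔
      v ∈ PySem.List.sorted S (fun v => v) false := by
    intro v
    rw [PySem.Set.contains_iff, PySem.Set.mem_ofList, PySem.List.mem_sorted]
  refine congrArg PySem.Dict.items ?_
  refine List.foldl_ext _ _ _ ?_
  intro blocked x _
  rw [pv_main_eq _ _ hmem x, pv_dbl_eq _ _ hmem x]
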